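-- pv_equiv track=rewrite | github.com/guesar2/Neural-Network-Decoder-Training-Data | tools.py | parse_01
-- ===== SOURCE A (Python) =====
-- def parse_01(data: str) -> list[list[bool]]:
--     shots = []
--     for line in data.split("\n"):
--         if not line:
--             continue
--         shot = []
--         for c in line:
--             assert c in "01"
--             shot.append(c == "1")
--         shots.append(shot)
--     return shots
-- ===== SOURCE B (Python) =====
-- def parse_01(data: str) -> list[list[bool]]:
--     shots = []
--     cur = []
--     for c in data + "\n":
--         if c == "\n":
--             if cur:
--                 shots.append(cur)
--             cur = []
--         else:
--             assert c in "01"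
--             cur.append(c == "1")
--     return shots
-- ===== Notes on version B (the rewrite author's own statement) =====
-- stated objective: alternative
-- what changed: B replaces A's split-then-nested-loops with a single flat character scan over data+'\n' maintaining a current-line buffer that is flushed at each newline; no split() and no nested iteration over lines.
import Mathlib
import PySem

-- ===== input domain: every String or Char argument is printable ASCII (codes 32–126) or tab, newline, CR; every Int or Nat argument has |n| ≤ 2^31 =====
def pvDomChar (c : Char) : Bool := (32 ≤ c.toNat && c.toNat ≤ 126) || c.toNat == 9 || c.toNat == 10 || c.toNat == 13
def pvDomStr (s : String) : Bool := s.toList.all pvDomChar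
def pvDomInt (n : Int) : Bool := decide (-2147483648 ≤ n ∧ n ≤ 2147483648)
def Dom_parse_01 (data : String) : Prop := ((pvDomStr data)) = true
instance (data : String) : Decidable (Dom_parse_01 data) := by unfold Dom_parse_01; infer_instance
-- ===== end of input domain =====

-- B replaces A's split-then-nested-loops with a single flat character scan over data+'\n'
-- that flushes a current-line buffer at each newline; objective: alternative.

-- ===== PORT A =====
-- A: split on '\n'; accumulator loop over lines skipping empty ones; inner accumulator
-- loop appending per-char booleans. (A's per-char assert raises outside Pre_parse_01.)
def parse_01 (data : String) : List (List Bool) :=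
  (PySem.Chars.splitOn data.toList ['\n']).foldl
    (fun shots line =>
      if line.isEmpty then shots
      else shots ++ [line.foldl (fun shot c => shot ++ [decide (c = '1')]) []]) []

-- ===== PORT B =====
-- B: one flat scan over the characters of data + "\n" (String append ported as list
-- append on the char lists, exact); state = (finished shots, current-line buffer);
-- a newline flushes the buffer (dropped if empty), any other char appends its boolean.
def pvScanStep (st : List (List Bool) × List Bool) (c : Char) :
    List (List Bool) × List Bool :=
  if c = '\n' then (if st.2.isEmpty then st.1 else st.1 ++ [st.2], [])
  else (st.1, st.2 ++ [decide (c = '1')])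

def parse_01_alt (data : String) : List (List Bool) :=
  ((data.toList ++ ['\n']).foldl pvScanStep ([], [])).1

-- ===== PRECONDITION & SPEC =====
-- Pre_ excludes exactly the inputs containing a character that is neither a binary digit
-- nor a line separator, on which A's assert raises AssertionError (B's assert raises there too).
def Pre_parse_01 (data : String) : Prop :=
  data.toList.all (fun c => c = '0' || c = '1' || c = '\n') = true
instance (data : String) : Decidable (Pre_parse_01 data) := by unfold Pre_parse_01; infer_instance

def pvWitness_parse_01 : String := "01\n10"

def Spec_parse_01 (data : String) (out : List (List Bool)) : Prop := out = parse_01_alt data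
instance (data : String) (out : List (List Bool)) : Decidable (Spec_parse_01 data out) := by unfold Spec_parse_01; infer_instance

-- ===== CLAIM =====
def Claim_equal_parse_01 : Prop := ∀ (data : String), Dom_parse_01 data → Pre_parse_01 data → Spec_parse_01 data (parse_01 data)

-- ===== LEMMAS AND PROOFS =====

-- PySem's splitOn with single separator '\n' is List.splitOnP (· == '\n').
theorem pv_go_splitOnP : ∀ (fuel : Nat) (l cur : List Char) (acc : List (List Char)),
    l.length < fuel →
    PySem.Chars.splitOn.go ['\n'] fuel l cur acc
      = acc.reverse ++ (List.splitOnP (fun c => c == '\n') l).modifyHead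
          (fun x => cur.reverse ++ x) := by
  intro fuel
  induction fuel with
  | zero => intro l cur acc h; omega
  | succ fuel ih =>
    intro l cur acc h
    match l with
    | [] =>
      simp [PySem.Chars.splitOn.go, List.splitOnP_nil]
    | c :: rest =>
      by_cases hc : c = '\n'
      · subst hc
        have hstep : PySem.Chars.splitOn.go ['\n'] (fuel+1) ('\n' :: rest) cur acc
            = PySem.Chars.splitOn.go ['\n'] fuel rest [] (cur.reverse :: acc) := by
          simp [PySem.Chars.splitOn.go, List.isPrefixOf]
        rw [hstep, ih rest [] _ (by simpa using Nat.lt_of_succ_lt_succ h)]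
        rw [List.splitOnP_cons, if_pos (by simp)]
        simp [show (fun x : List Char => x) = id from rfl, List.modifyHead_id]
      · have hstep : PySem.Chars.splitOn.go ['\n'] (fuel+1) (c :: rest) cur acc
            = PySem.Chars.splitOn.go ['\n'] fuel rest (c :: cur) acc := by
          simp [PySem.Chars.splitOn.go, List.isPrefixOf, Ne.symm hc]
        rw [hstep, ih rest (c :: cur) acc (by simpa using Nat.lt_of_succ_lt_succ h)]
        rw [List.splitOnP_cons, if_neg (by simp [hc])]
        rcases hsp : List.splitOnP (fun c => c == '\n') rest with _ | ⟨l', ls'⟩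
        · exact absurd hsp (List.splitOnP_ne_nil _ _)
        · simp [List.modifyHead_cons, List.append_assoc]

theorem pv_splitOn_eq (s : List Char) :
    PySem.Chars.splitOn s ['\n'] = List.splitOnP (fun c => c == '\n') s := by
  show PySem.Chars.splitOn.go ['\n'] (s.length + 1) s [] [] = _
  rw [pv_go_splitOnP (s.length + 1) s [] [] (Nat.lt_succ_self _)]
  simp [show (fun x : List Char => x) = id from rfl, List.modifyHead_id]

-- A's outer fold over the segments is filter-then-map.
theorem parse_01_loop (ls : List (List Char)) (acc : List (List Bool)) :
    ls.foldl
      (fun shots line =>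
        if line.isEmpty then shots
        else shots ++ [line.foldl (fun shot c => shot ++ [decide (c = '1')]) []]) acc
    = acc ++ (ls.filter (fun line => !line.isEmpty)).map
        (fun line => line.map (fun c => decide (c = '1'))) := by
  induction ls generalizing acc with
  | nil => simp
  | cons l ls ih =>
    rw [List.foldl_cons, List.filter_cons]
    by_cases h : l.isEmpty
    · rw [if_pos h, ih]
      simp [h]
    · rw [if_neg h, ih, PySem.List.foldl_append_singleton_eq_map]
      simp [h]

-- B's flat scan, characterised through the splitOnP segmentation of its input.
theorem pv_scan_eq : ∀ (cs : List Char) (shots : List (List Bool)) (cur : List Bool),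
    ((cs ++ ['\n']).foldl pvScanStep (shots, cur)).1
      = match List.splitOnP (fun c => c == '\n') cs with
        | [] => shots
        | l :: ls =>
          ls.foldl
            (fun sh l' => if (l'.map (fun c => decide (c = '1'))).isEmpty then sh
              else sh ++ [l'.map (fun c => decide (c = '1'))])
            (if (cur ++ l.map (fun c => decide (c = '1'))).isEmpty then shots
              else shots ++ [cur ++ l.map (fun c => decide (c = '1'))]) := by
  intro cs
  induction cs with
  | nil =>
    intro shots cur
    simp [pvScanStep, List.splitOnP_nil]
  | cons c cs ih =>
    intro shots cur
    by_cases hc : c = '\n'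
    · subst hc
      rw [List.cons_append, List.foldl_cons]
      have hstep : pvScanStep (shots, cur) '\n'
          = (if cur.isEmpty then shots else shots ++ [cur], []) := by
        simp [pvScanStep]
      rw [hstep, ih (if cur.isEmpty then shots else shots ++ [cur]) []]
      rw [List.splitOnP_cons,
        if_pos (show (('\n' : Char) == '\n') = true by simp)]
      rcases hsp : List.splitOnP (fun c => c == '\n') cs with _ | ⟨l, ls⟩
      · exact absurd hsp (List.splitOnP_ne_nil _ _)
      · simp [List.foldl_cons]
    · rw [List.cons_append, List.foldl_cons]
      have hstep : pvScanStep (shots, cur) c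
          = (shots, cur ++ [decide (c = '1')]) := by
        simp [pvScanStep, hc]
      rw [hstep, ih shots (cur ++ [decide (c = '1')])]
      rw [List.splitOnP_cons,
        if_neg (show ¬(((c == '\n')) = true) by simp [hc])]
      rcases hsp : List.splitOnP (fun c => c == '\n') cs with _ | ⟨l, ls⟩
      · exact absurd hsp (List.splitOnP_ne_nil _ _)
      · simp [List.modifyHead_cons, List.append_assoc]

-- Folding the flush step over the segments is filter-then-map.
theorem pv_segfold (ms : List (List Char)) (init : List (List Bool)) :
    ms.foldl
      (fun sh l' => if (l'.map (fun c => decide (c = '1'))).isEmpty then sh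
        else sh ++ [l'.map (fun c => decide (c = '1'))]) init
      = init ++ (ms.filter (fun v => !v.isEmpty)).map
          (fun l' => l'.map (fun c => decide (c = '1'))) := by
  induction ms generalizing init with
  | nil => simp
  | cons m ms ih =>
    rw [List.foldl_cons, List.filter_cons]
    by_cases h : m.isEmpty
    · rw [if_pos (by simp [List.isEmpty_map, h] : (m.map (fun c => decide (c = '1'))).isEmpty = true), ih]
      simp [h]
    · rw [if_neg (by simp [List.isEmpty_map, h]), ih]
      simp [h]

-- ===== VERDICT =====
theorem parse_01_spec : Claim_equal_parse_01 := by
  intro data _ _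
  show parse_01 data = parse_01_alt data
  unfold parse_01 parse_01_alt
  rw [pv_splitOn_eq, parse_01_loop, pv_scan_eq]
  rcases hsp : List.splitOnP (fun c => c == '\n') data.toList with _ | ⟨l, ls⟩
  · exact absurd hsp (List.splitOnP_ne_nil _ _)
  · dsimp only
    rw [pv_segfold, List.filter_cons]
    by_cases h : l.isEmpty
    · simp [h, List.isEmpty_map]
    · simp [h, List.isEmpty_map]
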